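-- pv_equiv track=rewrite | github.com/mouredev/Weekly-Challenge-2022-Kotlin | app/src/main/java/com/mouredev/weeklychallenge2022/reto34.py | array_ok
-- ===== SOURCE A (Python) =====
-- def array_ok (array):
--     #El array debe ser de enteros
--     for i in array:
--         if type(i) != int:
--             return False
--
--     #El array debe ser sin repetidos y ordenado
--     x=set(array)
--     x=sorted(x)
--
--     #Lo comparamos con el array inicial
--     if x==array:
--         return True
--     else:
--         return False
-- ===== SOURCE B (Python) =====
-- def array_ok(array):
--     prev = None
--     for v in array:
--         if type(v) is not int:
--             return False
--         if prev is not None and v <= prev: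
--             return False
--         prev = v
--     return True
-- ===== Notes on version B (the rewrite author's own statement) =====
-- stated objective: faster
-- what changed: Replaces building a set, sorting it and comparing with the original list by a single pass that checks each element is an int strictly greater than the previous one.
import Mathlib
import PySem

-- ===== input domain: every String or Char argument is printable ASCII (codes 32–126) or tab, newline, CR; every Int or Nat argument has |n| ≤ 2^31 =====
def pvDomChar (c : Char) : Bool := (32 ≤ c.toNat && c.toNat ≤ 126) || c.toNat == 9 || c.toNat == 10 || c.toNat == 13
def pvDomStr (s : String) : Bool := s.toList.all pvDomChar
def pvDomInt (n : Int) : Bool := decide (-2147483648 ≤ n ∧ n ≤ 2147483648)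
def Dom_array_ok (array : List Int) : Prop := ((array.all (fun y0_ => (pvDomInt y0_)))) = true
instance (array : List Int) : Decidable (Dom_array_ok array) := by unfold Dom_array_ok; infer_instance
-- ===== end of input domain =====

-- B replaces "sort the dedup set and compare" by one pass checking strictly increasing order (faster, O(n) vs O(n log n)).

-- ===== PORT A =====
-- the type check 'type(i) != int' is always false on List Int; the loop is ported as the vacuous any
def array_ok (array : List Int) : Bool :=
  if array.any (fun _ => false) then false
  else
    let x := PySem.Set.ofList array
    let x := PySem.List.sorted x (fun y => y) false
    if x == array then true else false

-- ===== PORT B =====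
-- the single pass, carrying the previous element ('prev is None' = the head case)
def pvChain (prev : Int) : List Int → Bool
  | [] => true
  | v :: t => if v ≤ prev then false else pvChain v t

def array_ok_alt (array : List Int) : Bool :=
  match array with
  | [] => true
  | v :: t => pvChain v t

-- ===== PRECONDITION & SPEC =====
def Spec_array_ok (array : List Int) (out : Bool) : Prop := out = array_ok_alt array
instance (array : List Int) (out : Bool) : Decidable (Spec_array_ok array out) := by unfold Spec_array_ok; infer_instance

-- ===== CLAIM (what is proved, stated in full; the proofs are below) =====
def Claim_equal_array_ok : Prop := ∀ (array : List Int), Dom_array_ok array → Spec_array_ok array (array_ok array)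

-- ===== LEMMAS AND PROOFS =====

lemma pvChain_eq_pairwise (p : Int) (t : List Int) :
    pvChain p t = true ↔ (p :: t).Pairwise (· < ·) := by
  induction t generalizing p with
  | nil => simp [pvChain]
  | cons v r ih =>
    simp only [pvChain]
    constructor
    · intro h
      by_cases hle : v ≤ p
      · simp [hle] at h
      · rw [if_neg hle] at h
        have := (ih v).mp h
        have hpv : p < v := lt_of_not_ge (fun hg => hle (by omega))
        refine List.Pairwise.cons ?_ this
        intro b hb
        rcases List.mem_cons.mp hb with hb | hb
        · omega
        · have := (List.pairwise_cons.mp this).1 b hb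
          omega
    · intro h
      have hpv : p < v := (List.pairwise_cons.mp h).1 v (by simp)
      have : (v :: r).Pairwise (· < ·) := (List.pairwise_cons.mp h).2
      rw [if_neg (by omega)]
      exact (ih v).mpr this

lemma alt_eq_pairwise (xs : List Int) :
    array_ok_alt xs = true ↔ xs.Pairwise (· < ·) := by
  cases xs with
  | nil => simp [array_ok_alt]
  | cons v t => simpa [array_ok_alt] using pvChain_eq_pairwise v t

lemma a_eq_pairwise (xs : List Int) :
    array_ok xs = true ↔ xs.Pairwise (· < ·) := by
  simp only [array_ok, List.any_eq_true]
  rw [if_neg (by simp)]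
  simp only [beq_iff_eq]
  constructor
  · intro h
    by_cases he : PySem.List.sorted (PySem.Set.ofList xs) (fun y => y) false = xs
    · rw [← he]; exact PySem.List.sorted_ofList_pairwise_lt xs
    · rw [if_neg he] at h; exact absurd h (by simp)
  · intro hp
    rw [if_pos]
    refine PySem.List.sorted_eq_of_perm_of_pairwise_lt _ xs _ ?_ hp
    have hnd : xs.Nodup := List.Pairwise.imp (fun h => ne_of_lt h) hp
    rw [PySem.Set.ofList_eq_self_of_nodup xs hnd]

-- ===== VERDICT (by name: the statement is the Claim_ definition above) =====
theorem array_ok_spec : Claim_equal_array_ok := by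
  intro array _
  unfold Spec_array_ok
  rcases hA : array_ok array with _ | _
  · rcases hB : array_ok_alt array with _ | _
    · rfl
    · exact absurd ((a_eq_pairwise array).mpr ((alt_eq_pairwise array).mp hB)) (by simp [hA])
  · exact ((alt_eq_pairwise array).mpr ((a_eq_pairwise array).mp hA)).symm
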